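-- pv_equiv track=rewrite | github.com/cowboydaniel/Outback-CommandCore | DROIDCOM/utils/helpers.py | is_valid_package_name
-- ===== SOURCE A (Python) =====
-- def is_valid_package_name(package_name):
--     """
--     Check if a string is a valid Android package name.
--
--     Args:
--         package_name: The package name to check
--
--     Returns:
--         bool: True if valid package name format
--     """
--     if not package_name:
--         return False
--
--     # Basic validation: must contain at least one dot and only valid characters
--     parts = package_name.split('.')
--     if len(parts) < 2:
--         return False
--
--     for part in parts:
--         if not part:  # Empty segment
--             return False
--         if not part[0].isalpha() and part[0] != '_':
--             return False
--         for char in part: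
--             if not (char.isalnum() or char == '_'):
--                 return False
--
--     return True
-- ===== SOURCE B (Python) =====
-- def is_valid_package_name(package_name):
--     """Single left-to-right scan, no split: track segment start and dot seen."""
--     if not package_name:
--         return False
--     at_start = True
--     seen_dot = False
--     for char in package_name:
--         if char == '.':
--             if at_start:
--                 return False
--             at_start = True
--             seen_dot = True
--         elif at_start:
--             if not (char.isalpha() or char == '_'):
--                 return False
--             at_start = False
--         else:
--             if not (char.isalnum() or char == '_'):
--                 return False
--     return (not at_start) and seen_dot
-- ===== Notes on version B (the rewrite author's own statement) =====
-- stated objective: alternative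
-- what changed: Replaces dot-splitting plus a nested per-part validation loop with a single left-to-right character scan that tracks two booleans (segment start, dot seen) and builds no intermediate list of parts.
import Mathlib
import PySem

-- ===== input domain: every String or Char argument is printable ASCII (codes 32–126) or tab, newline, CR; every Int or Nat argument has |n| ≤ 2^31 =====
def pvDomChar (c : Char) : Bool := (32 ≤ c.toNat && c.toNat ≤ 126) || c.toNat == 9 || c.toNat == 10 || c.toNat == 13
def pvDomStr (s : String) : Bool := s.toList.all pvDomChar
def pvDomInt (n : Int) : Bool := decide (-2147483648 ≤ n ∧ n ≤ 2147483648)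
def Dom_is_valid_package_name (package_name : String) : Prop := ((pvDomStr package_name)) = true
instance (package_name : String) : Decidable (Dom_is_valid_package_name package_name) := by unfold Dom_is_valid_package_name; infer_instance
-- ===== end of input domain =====

-- B replaces split('.') + nested per-part loops by one left-to-right scan with two booleans (no parts list); return value only, no side effects.

-- ===== PORT A =====
-- the body of A's 'for part in parts' loop: early returns become Bool conjunction
def pvPartOK (part : List Char) : Bool :=
  match part with
  | [] => false  -- 'if not part: return False'
  | c :: _ =>
    if !(PySem.Chars.isalpha c) && !(c == '_') then false
    else part.all (fun ch => PySem.Chars.isalnum ch || ch == '_')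

def is_valid_package_name (package_name : String) : Bool :=
  if package_name.toList = [] then false
  else
    let parts := PySem.Chars.splitOn package_name.toList ['.']
    if parts.length < 2 then false
    else parts.all pvPartOK

-- ===== PORT B =====
-- Source B's scan loop: atStart = at beginning of a segment, seenDot = a dot was consumed
def pvScan (cs : List Char) (atStart seenDot : Bool) : Bool :=
  match cs with
  | [] => !atStart && seenDot
  | c :: rest =>
    if c == '.' then
      if atStart then false else pvScan rest true true
    else if atStart then
      (PySem.Chars.isalpha c || c == '_') && pvScan rest false seenDot
    else
      (PySem.Chars.isalnum c || c == '_') && pvScan rest false seenDot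

def is_valid_package_name_alt (package_name : String) : Bool :=
  if package_name.toList = [] then false
  else pvScan package_name.toList true false

-- ===== PRECONDITION & SPEC =====
def Spec_is_valid_package_name (package_name : String) (out : Bool) : Prop := out = is_valid_package_name_alt package_name
instance (package_name : String) (out : Bool) : Decidable (Spec_is_valid_package_name package_name out) := by unfold Spec_is_valid_package_name; infer_instance

-- ===== CLAIM (what is proved, stated in full; the proofs are below) =====
def Claim_equal_is_valid_package_name : Prop := ∀ (package_name : String), Dom_is_valid_package_name package_name → Spec_is_valid_package_name package_name (is_valid_package_name package_name)

-- ===== LEMMAS AND PROOFS =====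

theorem pv_modifyHead_id {α : Type} (l : List α) : List.modifyHead (fun x => x) l = l := by
  cases l <;> rfl

-- PySem's fuel-based splitOn with the one-char separator '.' is List.splitOnP (· == '.')
theorem pv_go_eq (fuel : Nat) (l cur : List Char) (acc : List (List Char)) (h : l.length < fuel) :
    PySem.Chars.splitOn.go ['.'] fuel l cur acc
      = acc.reverse ++ (List.splitOnP (· == '.') l).modifyHead (cur.reverse ++ ·) := by
  induction fuel generalizing l cur acc with
  | zero => omega
  | succ f ih =>
    cases l with
    | nil => simp [PySem.Chars.splitOn.go, List.splitOnP_nil]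
    | cons c rest =>
      simp only [PySem.Chars.splitOn.go]
      by_cases hc : c = '.'
      · subst hc
        have hpre : List.isPrefixOf ['.'] ('.' :: rest) = true := by
          simp [List.isPrefixOf]
        rw [if_pos hpre]
        rw [ih _ _ _ (by simp at h ⊢; omega)]
        rw [List.splitOnP_cons]
        simp [pv_modifyHead_id]
      · have hpre : List.isPrefixOf ['.'] (c :: rest) = false := by
          simp only [List.isPrefixOf, Bool.and_true, beq_eq_false_iff_ne, ne_eq]
          exact fun h => hc h.symm
        rw [if_neg (by simp [hpre])]
        rw [ih _ _ _ (by simp at h ⊢; omega)]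
        have hcb : (c == '.') = false := by simp [hc]
        rw [List.splitOnP_cons]
        simp only [hcb, Bool.false_eq_true, if_false]
        rw [List.modifyHead_modifyHead]
        congr 1
        congr 1
        funext x
        simp

theorem pv_splitOn_dot (cs : List Char) :
    PySem.Chars.splitOn cs ['.'] = List.splitOnP (· == '.') cs := by
  unfold PySem.Chars.splitOn
  rw [pv_go_eq (cs.length + 1) cs [] [] (by omega)]
  simp [pv_modifyHead_id]

theorem pv_alpha_alnum (c : Char) (h : (PySem.Chars.isalpha c || c == '_') = true) :
    (PySem.Chars.isalnum c || c == '_') = true := by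
  simp [PySem.Chars.isalnum] at *
  tauto

-- joint characterisation of the scan against the parts of splitOnP
theorem pv_scan_spec (cs : List Char) : ∀ seenDot : Bool,
    (pvScan cs true seenDot
       = ((List.splitOnP (· == '.') cs).all pvPartOK
           && (seenDot || decide (2 ≤ (List.splitOnP (· == '.') cs).length))))
    ∧ (pvScan cs false seenDot
       = ((List.splitOnP (· == '.') cs).headI.all (fun ch => PySem.Chars.isalnum ch || ch == '_')
           && (List.splitOnP (· == '.') cs).tail.all pvPartOK
           && (seenDot || decide (2 ≤ (List.splitOnP (· == '.') cs).length)))) := by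
  induction cs with
  | nil => intro seenDot; constructor <;> simp [pvScan, List.splitOnP_nil, pvPartOK]
  | cons c rest ih =>
    intro seenDot
    obtain ⟨hd, tl, hsplit⟩ : ∃ hd tl, List.splitOnP (· == '.') rest = hd :: tl := by
      cases h : List.splitOnP (· == '.') rest with
      | nil => exact absurd h (List.splitOnP_ne_nil _ rest)
      | cons a t => exact ⟨a, t, rfl⟩
    by_cases hc : c = '.'
    · subst hc
      have h2 : decide (2 ≤ (List.splitOnP (· == '.') rest).length + 1) = true := by
        rw [hsplit]; simp
      constructor
      · simp [pvScan, List.splitOnP_cons, pvPartOK]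
      · simp only [pvScan, beq_self_eq_true, if_true, if_false, Bool.false_eq_true]
        rw [(ih true).1]
        simp only [List.splitOnP_cons, beq_self_eq_true, if_true, List.headI, List.tail, List.length_cons, h2]
        simp [pvPartOK]
    · have hcb : (c == '.') = false := by simp [hc]
      constructor
      · simp only [pvScan, hcb, Bool.false_eq_true, if_false, if_true]
        rw [(ih seenDot).2]
        simp only [List.splitOnP_cons, hcb, Bool.false_eq_true, if_false, hsplit,
          List.modifyHead_cons, List.headI, List.tail, List.all_cons, List.length_cons]
        by_cases hfst : (PySem.Chars.isalpha c || c == '_') = true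
        · have hch := pv_alpha_alnum c hfst
          simp only [hfst, Bool.true_and, pvPartOK]
          rw [if_neg (by
            simp at hfst ⊢
            intro hna
            rcases hfst with h | h
            · exact absurd h (by simp [hna])
            · exact h)]
          simp only [List.all_cons, hch, Bool.true_and, Bool.and_assoc]
        · simp only [Bool.not_eq_true] at hfst
          rw [Bool.or_eq_false_iff] at hfst
          have hbad : pvPartOK (c :: hd) = false := by
            simp only [pvPartOK]
            rw [if_pos (by simp [hfst.1, hfst.2])]
          simp [hfst.1, hfst.2, hbad]
      · simp only [pvScan, hcb, Bool.false_eq_true, if_false]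
        rw [(ih seenDot).2]
        simp only [List.splitOnP_cons, hcb, Bool.false_eq_true, if_false, hsplit,
          List.modifyHead_cons, List.headI, List.tail, List.all_cons, List.length_cons,
          Bool.and_assoc]

-- ===== VERDICT (by name: the statement is the Claim_ definition above) =====
theorem is_valid_package_name_spec : Claim_equal_is_valid_package_name := by
  intro s _
  unfold Spec_is_valid_package_name
  unfold is_valid_package_name is_valid_package_name_alt
  by_cases hnil : s.toList = []
  · simp [hnil]
  · rw [if_neg hnil, if_neg hnil]
    rw [pv_splitOn_dot, (pv_scan_spec s.toList false).1]
    simp only [Bool.false_or]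
    by_cases hlen : (List.splitOnP (· == '.') s.toList).length < 2
    · rw [if_pos hlen]
      simp [Nat.not_le.mpr hlen]
    · rw [if_neg hlen]
      simp [Nat.le_of_not_lt hlen]
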